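-- pv_equiv track=rewrite | github.com/shirazJafri/eng-to-psl | sentence_helpers.py | sort_noun_dict
-- ===== SOURCE A (Python) =====
-- def sort_noun_dict(psl_dict):
--     sorted_list = []
--
--     # Possession modifiers go first
--     for noun_pair in psl_dict['NOUN']:
--         if noun_pair[0] in ('poss'):
--             sorted_list.append(noun_pair)
--
--     # Subjects come first
--     for noun_pair in psl_dict['NOUN']:
--         if noun_pair[0] in ('csubj', 'csubjpass', 'nsubjpass', 'nsubj'):
--             sorted_list.append(noun_pair)
--
--     # Objects second
--     for noun_pair in psl_dict['NOUN']:
--         if noun_pair[0] in ('dobj', 'pobj'):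
--             sorted_list.append(noun_pair)
--
--     # Rest of the nouns
--     for noun_pair in psl_dict['NOUN']:
--         if noun_pair[0] not in ('dobj', 'pobj', 'poss') and noun_pair[0] not in ('csubj', 'csubjpass', 'nsubjpass', 'nsubj'):
--             sorted_list.append(noun_pair)
--
--     psl_dict['NOUN'] = sorted_list
--
--     return psl_dict
-- ===== SOURCE B (Python) =====
-- # One pass over psl_dict['NOUN'] with four independent buckets instead of four
-- # scans of the list; like A it mutates psl_dict in place (the 'NOUN' entry).
-- def sort_noun_dict(psl_dict):
--     poss, subj, obj, rest = [], [], [], []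
--     for noun_pair in psl_dict['NOUN']:
--         label = noun_pair[0]
--         if label in 'poss':  # substring test, as in A's ('poss')
--             poss.append(noun_pair)
--         if label in ('csubj', 'csubjpass', 'nsubjpass', 'nsubj'):
--             subj.append(noun_pair)
--         if label in ('dobj', 'pobj'):
--             obj.append(noun_pair)
--         if label not in ('dobj', 'pobj', 'poss') and label not in ('csubj', 'csubjpass', 'nsubjpass', 'nsubj'):
--             rest.append(noun_pair)
--     psl_dict['NOUN'] = poss + subj + obj + rest
--     return psl_dict
-- ===== Notes on version B (the rewrite author's own statement) =====
-- stated objective: simpler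
-- what changed: Replaces A's four full scans of psl_dict['NOUN'] by a single pass that files each noun pair into four independent (non-exclusive) buckets and concatenates them.
-- outside the precondition, e.g. on sort_noun_dict({}): A raises KeyError, B raises KeyError
import Mathlib
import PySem

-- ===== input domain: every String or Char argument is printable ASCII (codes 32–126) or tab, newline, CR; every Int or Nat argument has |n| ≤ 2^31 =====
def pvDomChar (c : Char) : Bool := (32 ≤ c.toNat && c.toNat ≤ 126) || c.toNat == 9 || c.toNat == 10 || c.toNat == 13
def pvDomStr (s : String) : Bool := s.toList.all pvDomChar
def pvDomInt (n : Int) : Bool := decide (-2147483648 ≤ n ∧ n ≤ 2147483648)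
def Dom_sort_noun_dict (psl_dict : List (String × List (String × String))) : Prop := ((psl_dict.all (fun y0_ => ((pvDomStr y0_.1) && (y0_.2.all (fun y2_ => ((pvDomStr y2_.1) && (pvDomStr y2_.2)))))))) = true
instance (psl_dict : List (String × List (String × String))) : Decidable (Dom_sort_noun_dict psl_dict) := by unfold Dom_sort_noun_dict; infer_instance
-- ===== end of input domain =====

-- B replaces A's four scans of psl_dict['NOUN'] by one pass with four independent buckets (simpler,
-- same result); both A and B mutate psl_dict's 'NOUN' entry in place — the equivalence proved is about the return value.
-- ===== PORT A =====
-- A: four scans of psl_dict['NOUN'], appending to one sorted_list; then psl_dict['NOUN'] = sorted_list.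
def sort_noun_dict (psl_dict : List (String × List (String × String))) : List (String × List (String × String)) :=
  let d := PySem.Dict.mk psl_dict
  match d.get? "NOUN" with
  | none => []   -- KeyError in Python; excluded by Pre_
  | some nouns =>
    let sl : List (String × String) := []
    -- Possession modifiers go first  (noun_pair[0] in ('poss') is a SUBSTRING test)
    let sl := nouns.foldl (fun acc np => if PySem.Str.isIn np.1 "poss" then acc ++ [np] else acc) sl
    -- Subjects come first
    let sl := nouns.foldl (fun acc np =>
      if np.1 == "csubj" || np.1 == "csubjpass" || np.1 == "nsubjpass" || np.1 == "nsubj" then acc ++ [np] else acc) sl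
    -- Objects second
    let sl := nouns.foldl (fun acc np =>
      if np.1 == "dobj" || np.1 == "pobj" then acc ++ [np] else acc) sl
    -- Rest of the nouns
    let sl := nouns.foldl (fun acc np =>
      if !(np.1 == "dobj" || np.1 == "pobj" || np.1 == "poss")
         && !(np.1 == "csubj" || np.1 == "csubjpass" || np.1 == "nsubjpass" || np.1 == "nsubj")
      then acc ++ [np] else acc) sl
    (d.insert "NOUN" sl).items

-- ===== PORT B =====
-- B: one pass over the noun list with four independent buckets; same in-place update of 'NOUN'.
def possLabel (s : String) : Bool := PySem.Str.isIn s "poss"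
def subjLabel (s : String) : Bool := s == "csubj" || s == "csubjpass" || s == "nsubjpass" || s == "nsubj"
def objLabel (s : String) : Bool := s == "dobj" || s == "pobj"
def restLabel (s : String) : Bool := !(s == "dobj" || s == "pobj" || s == "poss") && !(subjLabel s)

def bucketStep
    (st : List (String × String) × List (String × String) × List (String × String) × List (String × String))
    (np : String × String) :
    List (String × String) × List (String × String) × List (String × String) × List (String × String) :=
  (if possLabel np.1 then st.1 ++ [np] else st.1,
   if subjLabel np.1 then st.2.1 ++ [np] else st.2.1,
   if objLabel np.1 then st.2.2.1 ++ [np] else st.2.2.1,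
   if restLabel np.1 then st.2.2.2 ++ [np] else st.2.2.2)

def sortBuckets (nouns : List (String × String)) :
    List (String × String) × List (String × String) × List (String × String) × List (String × String) :=
  nouns.foldl bucketStep ([], [], [], [])

def sort_noun_dict_alt (psl_dict : List (String × List (String × String))) : List (String × List (String × String)) :=
  let d := PySem.Dict.mk psl_dict
  match d.get? "NOUN" with
  | none => []   -- KeyError in Python; excluded by Pre_
  | some nouns =>
    let (po, su, ob, re) := sortBuckets nouns
    (d.insert "NOUN" (po ++ su ++ ob ++ re)).items

-- ===== PRECONDITION & SPEC =====
-- Pre_: A raises KeyError when 'NOUN' is not a key of psl_dict; exactly those inputs are excluded.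
def Pre_sort_noun_dict (psl_dict : List (String × List (String × String))) : Prop :=
  "NOUN" ∈ psl_dict.map (·.1)
instance (psl_dict : List (String × List (String × String))) : Decidable (Pre_sort_noun_dict psl_dict) := by
  unfold Pre_sort_noun_dict; infer_instance
def pvWitness_sort_noun_dict : (List (String × List (String × String))) :=
  [("NOUN", [("nsubj", "cat"), ("dobj", "mat"), ("ss", "odd")]), ("VERB", [("ROOT", "sat")])]

def Spec_sort_noun_dict (psl_dict : List (String × List (String × String))) (out : List (String × List (String × String))) : Prop := out = sort_noun_dict_alt psl_dict
instance (psl_dict : List (String × List (String × String))) (out : List (String × List (String × String))) : Decidable (Spec_sort_noun_dict psl_dict out) := by unfold Spec_sort_noun_dict; infer_instance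

-- ===== CLAIM (what is proved, stated in full; the proofs are below) =====
def Claim_equal_sort_noun_dict : Prop := ∀ (psl_dict : List (String × List (String × String))), Dom_sort_noun_dict psl_dict → Pre_sort_noun_dict psl_dict → Spec_sort_noun_dict psl_dict (sort_noun_dict psl_dict)

-- ===== LEMMAS AND PROOFS =====
theorem bucketStep_foldl (nouns : List (String × String)) :
    ∀ po su ob re, nouns.foldl bucketStep (po, su, ob, re) =
      (po ++ nouns.filter (fun np => possLabel np.1),
       su ++ nouns.filter (fun np => subjLabel np.1),
       ob ++ nouns.filter (fun np => objLabel np.1),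
       re ++ nouns.filter (fun np => restLabel np.1)) := by
  induction nouns with
  | nil => intro po su ob re; simp
  | cons hd tl ih =>
    intro po su ob re
    simp only [List.foldl_cons, bucketStep, List.filter_cons]
    rw [ih]
    by_cases h1 : possLabel hd.1 <;> by_cases h2 : subjLabel hd.1 <;>
      by_cases h3 : objLabel hd.1 <;> by_cases h4 : restLabel hd.1 <;>
      simp [h1, h2, h3, h4]

theorem sortBuckets_eq (nouns : List (String × String)) :
    sortBuckets nouns = (nouns.filter (fun np => possLabel np.1),
                         nouns.filter (fun np => subjLabel np.1),
                         nouns.filter (fun np => objLabel np.1),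
                         nouns.filter (fun np => restLabel np.1)) := by
  simp [sortBuckets, bucketStep_foldl]


-- ===== VERDICT (by name: the statement is the Claim_ definition above) =====
theorem sort_noun_dict_spec : Claim_equal_sort_noun_dict := by
  intro psl_dict _hdom hpre
  unfold Spec_sort_noun_dict sort_noun_dict sort_noun_dict_alt
  cases h : (PySem.Dict.mk psl_dict).get? "NOUN" with
  | none =>
    -- impossible: Pre_ says the key 'NOUN' is present
    rw [PySem.Dict.get?_eq_none_iff_not_mem_keys] at h
    exact absurd hpre h
  | some nouns =>
    simp only [h, sortBuckets_eq, PySem.List.foldl_append_if_eq_filter, List.nil_append, possLabel,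
      subjLabel, objLabel, restLabel, List.append_assoc]
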